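-- pv_equiv track=rewrite | github.com/Hansisok/LearningDataScience | archive/D-S_evidence_theory.py | distribute_unique
-- ===== SOURCE A (Python) =====
-- def distribute_unique(arr: list, n: int):
--     result = []
--
--     def helper(current, depth, remaining):
--         if depth == n:
--             result.append(current)
--             return
--         # 每个人可以拿0个到len(remaining)个元素的任意组合
--         for i in range(2 ** len(remaining)):
--             subset = [remaining[j] for j in range(len(remaining)) if (i >> j) & 1]
--             new_remaining = [x for x in remaining if x not in subset]
--             helper(current + [subset], depth + 1, new_remaining)
--
--     helper([], 0, arr)
--     return result
-- ===== SOURCE B (Python) =====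
-- def distribute_unique(arr: list, n: int):
--     # Iterative level-by-level expansion over the n bins, keeping the per-level
--     # states as two parallel lists and caching each remainder's
--     # (subset, new_remaining) children so they are computed once per level.
--     currents = [[]]
--     rems = [arr]
--     for _ in range(n):
--         cache = {}
--         new_currents = []
--         new_rems = []
--         for current, remaining in zip(currents, rems):
--             key = tuple(remaining)
--             children = cache.get(key)
--             if children is None:
--                 children = []
--                 for i in range(2 ** len(remaining)):
--                     subset = [remaining[j] for j in range(len(remaining)) if (i >> j) & 1]
--                     new_remaining = [x for x in remaining if x not in subset]
--                     children.append((subset, new_remaining))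
--                 cache[key] = children
--             for subset, new_remaining in children:
--                 new_currents.append(current + [subset])
--                 new_rems.append(new_remaining)
--         currents = new_currents
--         rems = new_rems
--     return currents
-- ===== Notes on version B (the rewrite author's own statement) =====
-- stated objective: alternative
-- what changed: Replaced the recursive DFS helper (mutating a shared result list) with an iterative level-by-level worklist expansion over parallel currents/remainders lists, caching each remainder's (subset, new_remaining) children per level so they are computed once and shared; emission order is unchanged.
import Mathlib
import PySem

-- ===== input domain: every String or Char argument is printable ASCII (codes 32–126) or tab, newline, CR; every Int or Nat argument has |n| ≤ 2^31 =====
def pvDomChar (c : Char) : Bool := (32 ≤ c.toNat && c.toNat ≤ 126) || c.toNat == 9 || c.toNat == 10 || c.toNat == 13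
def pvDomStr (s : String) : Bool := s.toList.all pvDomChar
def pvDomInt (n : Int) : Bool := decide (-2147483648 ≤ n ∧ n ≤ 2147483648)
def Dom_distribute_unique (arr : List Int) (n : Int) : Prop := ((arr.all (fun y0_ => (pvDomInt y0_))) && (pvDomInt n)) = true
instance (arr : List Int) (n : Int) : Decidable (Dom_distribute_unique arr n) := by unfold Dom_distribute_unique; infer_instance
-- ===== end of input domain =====

-- B replaces A's recursive DFS helper by an iterative level-by-level worklist expansion
-- with a per-level cache of each remainder's children; objective: alternative decomposition.

-- subset = [remaining[j] for j in range(len(remaining)) if (i >> j) & 1]   (shared step of both Pythons)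
def pvSubset (rem : List Int) (i : Nat) : List Int :=
  (List.range rem.length).filterMap (fun j => if (i >>> j) &&& 1 == 1 then rem[j]? else none)

-- new_remaining = [x for x in remaining if x not in subset]   (shared step of both Pythons)
def pvNewRem (rem subset : List Int) : List Int :=
  rem.filter (fun x => !(subset.contains x))

-- ===== PORT A =====
-- A's recursive helper; fuel = number of levels still to go, only making the recursion total
-- (Python recurses forever when n < 0: those inputs are outside Pre_).
def pvHelperA (n : Int) : Nat → List (List Int) → Int → List Int → List (List (List Int))
  | fuel, current, depth, remaining =>
    if depth = n then [current]
    else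
      match fuel with
      | 0 => []
      | f + 1 =>
        (List.range (2 ^ remaining.length)).foldl
          (fun acc i =>
            acc ++ pvHelperA n f (current ++ [pvSubset remaining i]) (depth + 1)
                    (pvNewRem remaining (pvSubset remaining i))) []

def distribute_unique (arr : List Int) (n : Int) : List (List (List Int)) :=
  pvHelperA n n.toNat [] 0 arr

-- ===== PORT B =====
-- the children list [(subset, new_remaining), …] of one remainder (Source B's cache-miss loop)
def pvChildren (rem : List Int) : List (List Int × List Int) :=
  (List.range (2 ^ rem.length)).foldl
    (fun acc i => acc ++ [(pvSubset rem i, pvNewRem rem (pvSubset rem i))]) []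

-- one pass of Source B's worklist loop: fresh cache, expand every (current, remaining) state
-- into the two parallel lists (new_currents, new_rems)
def pvExpandP (currents : List (List (List Int))) (rems : List (List Int)) :
    List (List (List Int)) × List (List Int) :=
  ((currents.zip rems).foldl
    (fun (p : PySem.Dict (List Int) (List (List Int × List Int)) ×
              List (List (List Int)) × List (List Int)) st =>
      match p.1.get? st.2 with
      | some cs => (p.1, cs.foldl (fun q c => (q.1 ++ [st.1 ++ [c.1]], q.2 ++ [c.2])) p.2)
      | none =>
        let cs := pvChildren st.2
        (p.1.insert st.2 cs, cs.foldl (fun q c => (q.1 ++ [st.1 ++ [c.1]], q.2 ++ [c.2])) p.2))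
    (PySem.Dict.empty, ([], []))).2

def distribute_unique_alt (arr : List Int) (n : Int) : List (List (List Int)) :=
  ((List.range n.toNat).foldl (fun s _ => pvExpandP s.1 s.2) ([[]], [arr])).1

-- ===== PRECONDITION & SPEC =====
-- Pre_ excludes n < 0, on which Python A recurses forever (RecursionError); A returns on every n ≥ 0.
def Pre_distribute_unique (arr : List Int) (n : Int) : Prop := 0 ≤ n
instance (arr : List Int) (n : Int) : Decidable (Pre_distribute_unique arr n) := by unfold Pre_distribute_unique; infer_instance
def pvWitness_distribute_unique : List Int × Int := ([1, 2], 2)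

def Spec_distribute_unique (arr : List Int) (n : Int) (out : List (List (List Int))) : Prop := out = distribute_unique_alt arr n
instance (arr : List Int) (n : Int) (out : List (List (List Int))) : Decidable (Spec_distribute_unique arr n out) := by unfold Spec_distribute_unique; infer_instance

-- ===== CLAIM (what is proved, stated in full; the proofs are below) =====
def Claim_equal_distribute_unique : Prop := ∀ (arr : List Int) (n : Int), Dom_distribute_unique arr n → Pre_distribute_unique arr n → Spec_distribute_unique arr n (distribute_unique arr n)

-- ===== LEMMAS AND PROOFS =====

-- cache-free one-level expansion (proof-side model of pvExpandP)
def pvExpand (states : List (List (List Int) × List Int)) : List (List (List Int) × List Int) :=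
  states.flatMap (fun st => (pvChildren st.2).map (fun c => (st.1 ++ [c.1], c.2)))

-- a cache is good if every stored value is the children list of its key
def pvGood (d : PySem.Dict (List Int) (List (List Int × List Int))) : Prop :=
  ∀ k v, d.get? k = some v → v = pvChildren k

theorem pvInner_fold (cs : List (List Int × List Int)) (cur : List (List Int))
    (q : List (List (List Int)) × List (List Int)) :
    cs.foldl (fun q c => (q.1 ++ [cur ++ [c.1]], q.2 ++ [c.2])) q =
      (q.1 ++ cs.map (fun c => cur ++ [c.1]), q.2 ++ cs.map (fun c => c.2)) := by
  induction cs generalizing q with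
  | nil => simp
  | cons c cs ih => simp [ih]

theorem pvExpandP_loop (states : List (List (List Int) × List Int))
    (c : PySem.Dict (List Int) (List (List Int × List Int)))
    (q : List (List (List Int)) × List (List Int)) (hg : pvGood c) :
    (states.foldl
      (fun (p : PySem.Dict (List Int) (List (List Int × List Int)) ×
                List (List (List Int)) × List (List Int)) st =>
        match p.1.get? st.2 with
        | some cs => (p.1, cs.foldl (fun q c => (q.1 ++ [st.1 ++ [c.1]], q.2 ++ [c.2])) p.2)
        | none =>
          let cs := pvChildren st.2
          (p.1.insert st.2 cs, cs.foldl (fun q c => (q.1 ++ [st.1 ++ [c.1]], q.2 ++ [c.2])) p.2))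
      (c, q)).2 =
      (q.1 ++ (pvExpand states).map Prod.fst, q.2 ++ (pvExpand states).map Prod.snd) := by
  induction states generalizing c q with
  | nil => simp [pvExpand]
  | cons st rest ih =>
    rw [List.foldl_cons]
    have hexp : pvExpand (st :: rest) =
        (pvChildren st.2).map (fun cc => (st.1 ++ [cc.1], cc.2)) ++ pvExpand rest := by
      simp [pvExpand]
    cases hget : c.get? st.2 with
    | some cs =>
      have hcs : cs = pvChildren st.2 := hg st.2 cs hget
      rw [ih c _ hg, pvInner_fold, hexp, hcs]
      simp [List.map_map, Function.comp_def]
    | none =>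
      have hg' : pvGood (c.insert st.2 (pvChildren st.2)) := by
        intro k v hkv
        rw [PySem.Dict.get?_insert] at hkv
        split at hkv
        · cases hkv; subst ‹k = st.2›; rfl
        · exact hg k v hkv
      rw [ih _ _ hg', pvInner_fold, hexp]
      simp [List.map_map, Function.comp_def]

theorem pvExpandP_eq (currents : List (List (List Int))) (rems : List (List Int)) :
    pvExpandP currents rems =
      ((pvExpand (currents.zip rems)).map Prod.fst,
       (pvExpand (currents.zip rems)).map Prod.snd) := by
  unfold pvExpandP
  rw [pvExpandP_loop (currents.zip rems) PySem.Dict.empty ([], []) (fun k v h => by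
    rw [PySem.Dict.get?_empty] at h; cases h)]
  simp

theorem pvExpand_append (s t : List (List (List Int) × List Int)) :
    pvExpand (s ++ t) = pvExpand s ++ pvExpand t := by
  simp [pvExpand]

theorem pvExpand_iterate_nil (f : Nat) : pvExpand^[f] ([] : List (List (List Int) × List Int)) = [] := by
  induction f with
  | zero => rfl
  | succ f ih => rw [Function.iterate_succ_apply]; exact ih

theorem pvExpand_iterate_append (f : Nat) (s t : List (List (List Int) × List Int)) :
    pvExpand^[f] (s ++ t) = pvExpand^[f] s ++ pvExpand^[f] t := by
  induction f generalizing s t with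
  | zero => simp
  | succ f ih => simp [Function.iterate_succ_apply, pvExpand_append, ih]

theorem pvExpand_iterate_map {α : Type} (f : Nat) (l : List α)
    (h : α → List (List Int) × List Int) :
    (pvExpand^[f] (l.map h)) = l.flatMap (fun a => pvExpand^[f] [h a]) := by
  induction l with
  | nil => simpa using pvExpand_iterate_nil f
  | cons a l ih =>
    have hc : ((a :: l).map h) = [h a] ++ l.map h := rfl
    rw [hc, pvExpand_iterate_append, ih, List.flatMap_cons]

theorem foldl_range_iterate {α : Type} (f : α → α) (k : Nat) (s : α) :
    (List.range k).foldl (fun a _ => f a) s = f^[k] s := by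
  induction k with
  | zero => simp
  | succ k ih => simp [List.range_succ, ih, Function.iterate_succ_apply']

theorem pvExpand_singleton (cur : List (List Int)) (rem : List Int) :
    pvExpand [(cur, rem)] =
      (List.range (2 ^ rem.length)).map
        (fun i => (cur ++ [pvSubset rem i], pvNewRem rem (pvSubset rem i))) := by
  unfold pvExpand
  rw [List.flatMap_cons, List.flatMap_nil, List.append_nil]
  unfold pvChildren
  rw [PySem.List.foldl_append_singleton_eq_map, List.nil_append, List.map_map]
  rfl

theorem pvHelperA_iterate (n : Int) (f : Nat) (cur : List (List Int)) (depth : Int)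
    (rem : List Int) (h : depth + f = n) :
    pvHelperA n f cur depth rem = (pvExpand^[f] [(cur, rem)]).map Prod.fst := by
  induction f generalizing cur depth rem with
  | zero =>
    have : depth = n := by simpa using h
    simp [pvHelperA, this]
  | succ f ih =>
    have hne : depth ≠ n := by omega
    rw [show pvHelperA n (f + 1) cur depth rem =
        (List.range (2 ^ rem.length)).foldl
          (fun acc i =>
            acc ++ pvHelperA n f (cur ++ [pvSubset rem i]) (depth + 1)
                    (pvNewRem rem (pvSubset rem i))) [] from by
      rw [pvHelperA]; simp [hne]]
    rw [PySem.List.foldl_append_eq_flatMap, List.nil_append, Function.iterate_succ_apply,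
      pvExpand_singleton, pvExpand_iterate_map, List.map_flatMap]
    congr 1
    funext i
    exact ih (cur ++ [pvSubset rem i]) (depth + 1) (pvNewRem rem (pvSubset rem i)) (by omega)

theorem pvZip_map_fst_snd {α β : Type} (l : List (α × β)) :
    (l.map Prod.fst).zip (l.map Prod.snd) = l := by
  induction l with
  | nil => rfl
  | cons a l ih => simp [ih]

-- ===== VERDICT (by name: the statement is the Claim_ definition above) =====
theorem distribute_unique_spec : Claim_equal_distribute_unique := by
  intro arr n _ hpre
  unfold Pre_distribute_unique at hpre
  unfold Spec_distribute_unique distribute_unique distribute_unique_alt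
  rw [foldl_range_iterate]
  rw [show (fun (s : List (List (List Int)) × List (List Int)) => pvExpandP s.1 s.2)^[n.toNat]
        ([[]], [arr]) =
      ((pvExpand^[n.toNat] [([], arr)]).map Prod.fst,
       (pvExpand^[n.toNat] [([], arr)]).map Prod.snd) from by
    induction n.toNat with
    | zero => simp
    | succ k ihk =>
      rw [Function.iterate_succ_apply', ihk, Function.iterate_succ_apply', pvExpandP_eq,
        pvZip_map_fst_snd]]
  exact pvHelperA_iterate n n.toNat [] 0 arr (by omega)
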